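-- pv_equiv track=rewrite | github.com/Ganesh88853/Infosys-project---AI-Resume-Analyzer | backend/recommender/job_grouper.py | group_jobs_by_match
-- ===== SOURCE A (Python) =====
-- def group_jobs_by_match(jobs):
--     groups = {
--         "excellent": [],
--         "good": [],
--         "fair": []
--     }
--
--     for job in jobs:
--         score = job.get("match_score", 0)
--
--         if score >= 85:
--             groups["excellent"].append(job)
--         elif score >= 70:
--             groups["good"].append(job)
--         elif score >= 60:
--             groups["fair"].append(job)
--
--     return groups
-- ===== SOURCE B (Python) =====
-- def group_jobs_by_match(jobs):
--     def score(job):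
--         return job.get("match_score", 0)
--     return {
--         "excellent": [j for j in jobs if score(j) >= 85],
--         "good": [j for j in jobs if 70 <= score(j) < 85],
--         "fair": [j for j in jobs if 60 <= score(j) < 70],
--     }
-- ===== Notes on version B (the rewrite author's own statement) =====
-- stated objective: alternative
-- what changed: Replaced the single accumulating loop with cascading if/elif branches by three independent filter passes over jobs, one per tier with explicit bounded ranges (>=85, 70..84, 60..69).
import Mathlib
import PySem

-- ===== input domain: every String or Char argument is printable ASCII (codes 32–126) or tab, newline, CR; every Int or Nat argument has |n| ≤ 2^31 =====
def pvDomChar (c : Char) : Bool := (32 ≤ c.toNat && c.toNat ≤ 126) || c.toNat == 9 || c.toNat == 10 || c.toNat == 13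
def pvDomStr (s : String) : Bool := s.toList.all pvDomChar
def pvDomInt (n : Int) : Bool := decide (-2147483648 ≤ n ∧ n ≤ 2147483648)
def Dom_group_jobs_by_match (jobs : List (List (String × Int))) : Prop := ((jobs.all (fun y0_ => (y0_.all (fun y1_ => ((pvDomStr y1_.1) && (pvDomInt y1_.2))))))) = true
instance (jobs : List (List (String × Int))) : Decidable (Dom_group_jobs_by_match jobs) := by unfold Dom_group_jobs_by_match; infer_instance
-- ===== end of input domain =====

-- B replaces A's single accumulating loop by three independent per-tier filter passes with explicit bounded ranges (alternative decomposition, same cost).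

-- ===== PORT A =====
-- Port of A: one fold over jobs; the fixed-key dict {"excellent","good","fair"} is the
-- triple of its three lists, appended to by the cascading if/elif branches.
def group_jobs_by_match (jobs : List (List (String × Int))) : List (String × List (List (String × Int))) :=
  let g := jobs.foldl
    (fun (g : List (List (String × Int)) × List (List (String × Int)) × List (List (String × Int))) job =>
      let score := PySem.Dict.getD ⟨job⟩ "match_score" 0
      if score ≥ 85 then (g.1 ++ [job], g.2.1, g.2.2)
      else if score ≥ 70 then (g.1, g.2.1 ++ [job], g.2.2)
      else if score ≥ 60 then (g.1, g.2.1, g.2.2 ++ [job])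
      else g)
    ([], [], [])
  [("excellent", g.1), ("good", g.2.1), ("fair", g.2.2)]

-- ===== PORT B =====
-- Port of B: three independent filter passes, one per tier with explicit bounded ranges.
def pvScore (job : List (String × Int)) : Int := PySem.Dict.getD ⟨job⟩ "match_score" 0

def group_jobs_by_match_alt (jobs : List (List (String × Int))) : List (String × List (List (String × Int))) :=
  [("excellent", jobs.filter (fun j => decide (85 ≤ pvScore j))),
   ("good", jobs.filter (fun j => decide (70 ≤ pvScore j) && decide (pvScore j < 85))),
   ("fair", jobs.filter (fun j => decide (60 ≤ pvScore j) && decide (pvScore j < 70)))]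

-- ===== PRECONDITION & SPEC =====
def Spec_group_jobs_by_match (jobs : List (List (String × Int))) (out : List (String × List (List (String × Int)))) : Prop := out = group_jobs_by_match_alt jobs
instance (jobs : List (List (String × Int))) (out : List (String × List (List (String × Int)))) : Decidable (Spec_group_jobs_by_match jobs out) := by unfold Spec_group_jobs_by_match; infer_instance

-- ===== CLAIM (what is proved, stated in full; the proofs are below) =====
def Claim_equal_group_jobs_by_match : Prop := ∀ (jobs : List (List (String × Int))), Dom_group_jobs_by_match jobs → Spec_group_jobs_by_match jobs (group_jobs_by_match jobs)

-- ===== LEMMAS AND PROOFS =====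

-- ===== VERDICT (by name: the statement is the Claim_ definition above) =====
lemma fold_eq (jobs : List (List (String × Int)))
    (a b c : List (List (String × Int))) :
    jobs.foldl
      (fun (g : List (List (String × Int)) × List (List (String × Int)) × List (List (String × Int))) job =>
        let score := PySem.Dict.getD ⟨job⟩ "match_score" 0
        if score ≥ 85 then (g.1 ++ [job], g.2.1, g.2.2)
        else if score ≥ 70 then (g.1, g.2.1 ++ [job], g.2.2)
        else if score ≥ 60 then (g.1, g.2.1, g.2.2 ++ [job])
        else g)
      (a, b, c) =
    (a ++ jobs.filter (fun j => decide (85 ≤ pvScore j)),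
     b ++ jobs.filter (fun j => decide (70 ≤ pvScore j) && decide (pvScore j < 85)),
     c ++ jobs.filter (fun j => decide (60 ≤ pvScore j) && decide (pvScore j < 70))) := by
  induction jobs generalizing a b c with
  | nil => simp
  | cons j js ih =>
      simp only [List.foldl_cons, List.filter_cons, pvScore]
      by_cases h85 : (85:Int) ≤ PySem.Dict.getD ⟨j⟩ "match_score" 0
      · have h1 : ¬ PySem.Dict.getD ⟨j⟩ "match_score" 0 < 85 := by omega
        have h2 : ¬ PySem.Dict.getD ⟨j⟩ "match_score" 0 < 70 := by omega
        simp only [ge_iff_le, if_pos h85, ih]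
        simp [pvScore, h85, h1, h2]
      · by_cases h70 : (70:Int) ≤ PySem.Dict.getD ⟨j⟩ "match_score" 0
        · have h1 : PySem.Dict.getD ⟨j⟩ "match_score" 0 < 85 := by omega
          have h2 : ¬ PySem.Dict.getD ⟨j⟩ "match_score" 0 < 70 := by omega
          simp only [ge_iff_le, if_neg h85, if_pos h70, ih]
          simp [pvScore, h85, h70, h1, h2]
        · by_cases h60 : (60:Int) ≤ PySem.Dict.getD ⟨j⟩ "match_score" 0
          · have h1 : PySem.Dict.getD ⟨j⟩ "match_score" 0 < 70 := by omega
            simp only [ge_iff_le, if_neg h85, if_neg h70, if_pos h60, ih]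
            simp [pvScore, h85, h70, h60, h1]
          · simp only [ge_iff_le, if_neg h85, if_neg h70, if_neg h60, ih]
            simp [pvScore, h85, h70, h60]

theorem group_jobs_by_match_spec : Claim_equal_group_jobs_by_match := by
  intro jobs _
  unfold Spec_group_jobs_by_match group_jobs_by_match group_jobs_by_match_alt
  simp [fold_eq]
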